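-- pv_equiv track=rewrite | github.com/nekdatasoultions/muxingRPDB-Platform-Framework | scripts/deployment/muxer_customer_lib.py | _derive_routing_remove_lines
-- ===== SOURCE A (Python) =====
-- def _executable_lines(text: str) -> list[str]:
--     return [
--         line.strip()
--         for line in text.splitlines()
--         if line.strip() and not line.lstrip().startswith("#")
--     ]
--
-- def _derive_routing_remove_lines(rule_text: str, route_text: str) -> list[str]:
--     removals: list[str] = []
--     for line in _executable_lines(rule_text):
--         if line.startswith("ip rule add "):
--             removals.append("ip rule del " + line.removeprefix("ip rule add ") + " || true")
--         else:
--             removals.append(f"# manual rule cleanup required: {line}")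
--     for line in _executable_lines(route_text):
--         if line.startswith("ip route replace "):
--             removals.append("ip route del " + line.removeprefix("ip route replace ") + " || true")
--         elif line.startswith("ip route add "):
--             removals.append("ip route del " + line.removeprefix("ip route add ") + " || true")
--         else:
--             removals.append(f"# manual route cleanup required: {line}")
--     return removals
-- ===== SOURCE B (Python) =====
-- def _convert(line, kind):
--     words = line.split(" ")
--     if kind == "rule" and len(words) > 3 and words[:3] == ["ip", "rule", "add"]:
--         return "ip rule del " + " ".join(words[3:]) + " || true"
--     if kind == "route" and len(words) > 3 and words[:3] in (["ip", "route", "replace"], ["ip", "route", "add"]):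
--         return "ip route del " + " ".join(words[3:]) + " || true"
--     return "# manual %s cleanup required: %s" % (kind, line)
--
--
-- def _removals(raw_lines, kind):
--     if not raw_lines:
--         return []
--     rest = _removals(raw_lines[1:], kind)
--     line = raw_lines[0].strip()
--     if not line or line[0] == "#":
--         return rest
--     return [_convert(line, kind)] + rest
--
--
-- def _derive_routing_remove_lines(rule_text: str, route_text: str) -> list[str]:
--     return _removals(rule_text.splitlines(), "rule") + _removals(route_text.splitlines(), "route")
-- ===== Notes on version B (the rewrite author's own statement) =====
-- stated objective: alternative
-- what changed: Replaces the two filter-then-elif prefix-rewrite loops by one recursive pass per text that merges the comment/blank filtering into the recursion and classifies each line by tokenizing it on spaces and pattern-matching the first three words (collapsing the two route branches into one), rebuilding the command tail with ' '.join instead of removeprefix.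
import Mathlib
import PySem

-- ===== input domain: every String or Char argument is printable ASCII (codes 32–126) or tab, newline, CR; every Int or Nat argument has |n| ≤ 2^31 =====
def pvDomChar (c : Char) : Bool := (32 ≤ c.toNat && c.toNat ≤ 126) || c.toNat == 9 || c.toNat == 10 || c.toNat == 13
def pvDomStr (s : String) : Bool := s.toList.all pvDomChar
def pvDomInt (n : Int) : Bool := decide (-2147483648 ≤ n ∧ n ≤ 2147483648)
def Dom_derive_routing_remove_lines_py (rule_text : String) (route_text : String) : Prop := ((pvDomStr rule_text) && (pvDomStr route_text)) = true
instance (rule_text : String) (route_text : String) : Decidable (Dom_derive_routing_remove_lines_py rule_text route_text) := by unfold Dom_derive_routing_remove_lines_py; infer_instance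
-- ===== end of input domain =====

-- B replaces A's filter-then-elif prefix-rewrite loops by one recursive pass per text that
-- tokenizes each line on spaces and pattern-matches its first three words (objective: alternative).

-- Python's str.removeprefix (exact: drop the prefix iff it is a prefix), used by A
def pyRemovePrefix (s p : String) : String :=
  if PySem.Str.startswith s p then String.ofList (s.toList.drop p.toList.length) else s

-- ===== PORT A =====
-- _executable_lines: the comprehension [line.strip() for line in text.splitlines()
--                                       if line.strip() and not line.lstrip().startswith("#")]
def pvExecLinesA (text : String) : List String :=
  ((PySem.Str.splitlines text).filter (fun line =>
      !(PySem.Str.strip line == "") && !(PySem.Str.startswith (PySem.Str.lstrip line) "#"))).map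
    (fun line => PySem.Str.strip line)

def derive_routing_remove_lines_py (rule_text : String) (route_text : String) : List String :=
  let removals : List String := []
  let removals := (pvExecLinesA rule_text).foldl (fun acc line =>
    if PySem.Str.startswith line "ip rule add " then
      acc ++ ["ip rule del " ++ pyRemovePrefix line "ip rule add " ++ " || true"]
    else
      acc ++ ["# manual rule cleanup required: " ++ line]) removals
  let removals := (pvExecLinesA route_text).foldl (fun acc line =>
    if PySem.Str.startswith line "ip route replace " then
      acc ++ ["ip route del " ++ pyRemovePrefix line "ip route replace " ++ " || true"]
    else if PySem.Str.startswith line "ip route add " then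
      acc ++ ["ip route del " ++ pyRemovePrefix line "ip route add " ++ " || true"]
    else
      acc ++ ["# manual route cleanup required: " ++ line]) removals
  removals

-- ===== PORT B =====
-- _convert(line, kind): tokenize the line on single spaces and classify it by its first
-- three words ('line.split(" ")': the separator " " is nonempty, so split? is always some)
def pvConvert (line : String) (kind : String) : String :=
  let words := (PySem.Str.split? line " ").getD []
  if kind == "rule" && decide (3 < words.length) && words.take 3 == ["ip", "rule", "add"] then
    "ip rule del " ++ PySem.Str.join " " (words.drop 3) ++ " || true"
  else if kind == "route" && decide (3 < words.length) &&
      (words.take 3 == ["ip", "route", "replace"] || words.take 3 == ["ip", "route", "add"]) then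
    "ip route del " ++ PySem.Str.join " " (words.drop 3) ++ " || true"
  else
    "# manual " ++ kind ++ " cleanup required: " ++ line

-- _removals(raw_lines, kind): recursion over the raw lines, blank/comment filtering merged in
def pvRemovals : List String → String → List String
  | [], _ => []
  | raw :: raws, kind =>
    let rest := pvRemovals raws kind
    let line := PySem.Str.strip raw
    -- 'not line or line[0] == "#"': line[0] is a 1-char string, modelled as the Char at index 0
    if line == "" || PySem.Str.pyGet? line 0 == some '#' then rest
    else pvConvert line kind :: rest

def derive_routing_remove_lines_py_alt (rule_text : String) (route_text : String) : List String :=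
  pvRemovals (PySem.Str.splitlines rule_text) "rule"
    ++ pvRemovals (PySem.Str.splitlines route_text) "route"

-- ===== PRECONDITION & SPEC =====
def Spec_derive_routing_remove_lines_py (rule_text : String) (route_text : String) (out : List String) : Prop := out = derive_routing_remove_lines_py_alt rule_text route_text
instance (rule_text : String) (route_text : String) (out : List String) : Decidable (Spec_derive_routing_remove_lines_py rule_text route_text out) := by unfold Spec_derive_routing_remove_lines_py; infer_instance

-- ===== CLAIM (what is proved, stated in full; the proofs are below) =====
def Claim_equal_derive_routing_remove_lines_py : Prop := ∀ (rule_text : String) (route_text : String), Dom_derive_routing_remove_lines_py rule_text route_text → Spec_derive_routing_remove_lines_py rule_text route_text (derive_routing_remove_lines_py rule_text route_text)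

-- ===== LEMMAS AND PROOFS =====

-- ---- a reference model for single-space splitting: str.split(" ") as structural recursion ----
def splitCh : List Char → List (List Char)
  | [] => [[]]
  | c :: cs => if c = ' ' then [] :: splitCh cs else (splitCh cs).modifyHead (c :: ·)

lemma splitCh_exists (cs : List Char) : ∃ h tl, splitCh cs = h :: tl := by
  induction cs with
  | nil => exact ⟨[], [], rfl⟩
  | cons c cs ih =>
    obtain ⟨h, tl, hh⟩ := ih
    by_cases hc : c = ' '
    · exact ⟨[], splitCh cs, by simp [splitCh, hc]⟩
    · exact ⟨c :: h, tl, by simp [splitCh, hc, hh]⟩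

lemma go_eq (fuel : ℕ) : ∀ (l cur : List Char) (acc : List (List Char)), l.length < fuel →
    PySem.Chars.splitOn.go [' '] fuel l cur acc =
      acc.reverse ++ (splitCh l).modifyHead (cur.reverse ++ ·) := by
  induction fuel with
  | zero => intro l cur acc h; omega
  | succ n ih =>
    intro l cur acc h
    cases l with
    | nil => simp [PySem.Chars.splitOn.go, splitCh]
    | cons c rest =>
      by_cases hc : c = ' '
      · subst hc
        rw [show PySem.Chars.splitOn.go [' '] (n+1) (' ' :: rest) cur acc =
            PySem.Chars.splitOn.go [' '] n rest [] (cur.reverse :: acc) from by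
          simp [PySem.Chars.splitOn.go, List.isPrefixOf]]
        rw [ih rest [] _ (by simpa using Nat.lt_of_succ_lt_succ (by simpa using h))]
        obtain ⟨hh, tl, hsp⟩ := splitCh_exists rest
        simp [splitCh, hsp]
      · rw [show PySem.Chars.splitOn.go [' '] (n+1) (c :: rest) cur acc =
            PySem.Chars.splitOn.go [' '] n rest (c :: cur) acc from by
          rw [PySem.Chars.splitOn.go.eq_3,
            if_neg (by simp [List.isPrefixOf]; exact fun h' => hc h'.symm)]]
        rw [ih rest _ _ (by simp at h ⊢; omega)]
        obtain ⟨hh, tl, hsp⟩ := splitCh_exists rest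
        simp [splitCh, hsp, hc]

lemma splitOn_eq (l : List Char) : PySem.Chars.splitOn l [' '] = splitCh l := by
  rw [PySem.Chars.splitOn, go_eq (l.length + 1) l [] [] (by omega)]
  obtain ⟨h, tl, hs⟩ := splitCh_exists l
  simp [hs]

lemma word_split (w cs : List Char) (hw : ' ' ∉ w) : splitCh (w ++ ' ' :: cs) = w :: splitCh cs := by
  induction w with
  | nil => simp [splitCh]
  | cons a w ih =>
    have ha : ¬ a = ' ' := fun h => hw (h ▸ List.mem_cons_self)
    simp only [List.cons_append, splitCh, if_neg ha, ih (fun h => hw (List.mem_cons_of_mem _ h))]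
    rfl

lemma inter_single (x : List Char) : List.intercalate [' '] [x] = x := by
  simp [List.intercalate]

lemma inter_cons2 (a b : List Char) (t : List (List Char)) :
    List.intercalate [' '] (a :: b :: t) = a ++ ' ' :: List.intercalate [' '] (b :: t) := by
  simp only [List.intercalate, List.intersperse_cons₂, List.flatten_cons, List.cons_append,
    List.nil_append]

lemma join_splitCh (cs : List Char) : List.intercalate [' '] (splitCh cs) = cs := by
  induction cs with
  | nil => simp [splitCh, inter_single]
  | cons c cs ih =>
    obtain ⟨h, tl, hs⟩ := splitCh_exists cs
    by_cases hc : c = ' '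
    · subst hc
      simp [splitCh, hs, inter_cons2]
      rw [← hs, ih]
    · simp only [splitCh, if_neg hc, hs, List.modifyHead] at ih ⊢
      cases tl with
      | nil => simp only [inter_single] at ih ⊢; rw [ih]
      | cons b t => simp only [inter_cons2, List.cons_append] at ih ⊢; rw [ih]

lemma pre_reassoc (w1 w2 w3 t : List Char) :
    (w1 ++ ' ' :: w2 ++ ' ' :: w3 ++ [' ']) ++ t = w1 ++ ' ' :: (w2 ++ ' ' :: (w3 ++ ' ' :: t)) := by
  simp

lemma token_iff (w1 w2 w3 l : List Char) (h1 : ' ' ∉ w1) (h2 : ' ' ∉ w2) (h3 : ' ' ∉ w3) :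
    ((splitCh l).take 3 = [w1, w2, w3] ∧ 3 < (splitCh l).length) ↔
      PySem.Chars.startswith l (w1 ++ ' ' :: w2 ++ ' ' :: w3 ++ [' ']) = true := by
  constructor
  · rintro ⟨ht, hl⟩
    obtain ⟨a, b, c, r, rest, he⟩ : ∃ a b c r rest, splitCh l = a :: b :: c :: r :: rest := by
      match hsp : splitCh l with
      | [] | [_] | [_, _] | [_, _, _] => rw [hsp] at hl; simp at hl
      | a :: b :: c :: r :: rest => exact ⟨a, b, c, r, rest, rfl⟩
    rw [he] at ht
    simp only [List.take, List.cons.injEq, and_true] at ht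
    obtain ⟨ha1, hb1, hc1⟩ := ht
    have hl' : l = (w1 ++ ' ' :: w2 ++ ' ' :: w3 ++ [' ']) ++ List.intercalate [' '] (r :: rest) := by
      conv_lhs => rw [← join_splitCh l, he]
      rw [inter_cons2, inter_cons2, inter_cons2, ha1, hb1, hc1, pre_reassoc]
    rw [PySem.Chars.startswith, List.isPrefixOf_iff_prefix, hl']
    exact List.prefix_append _ _
  · intro hp
    rw [PySem.Chars.startswith, List.isPrefixOf_iff_prefix] at hp
    obtain ⟨t, ht⟩ := hp
    rw [← ht, pre_reassoc, word_split _ _ h1, word_split _ _ h2, word_split _ _ h3]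
    obtain ⟨h, tl, hs⟩ := splitCh_exists t
    simp [hs]

lemma token_tail (w1 w2 w3 l : List Char) (h1 : ' ' ∉ w1) (h2 : ' ' ∉ w2) (h3 : ' ' ∉ w3)
    (hp : PySem.Chars.startswith l (w1 ++ ' ' :: w2 ++ ' ' :: w3 ++ [' ']) = true) :
    List.intercalate [' '] ((splitCh l).drop 3) =
      l.drop (w1 ++ ' ' :: w2 ++ ' ' :: w3 ++ [' ']).length := by
  rw [PySem.Chars.startswith, List.isPrefixOf_iff_prefix] at hp
  obtain ⟨t, ht⟩ := hp
  rw [← ht, pre_reassoc, word_split _ _ h1, word_split _ _ h2, word_split _ _ h3,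
    ← pre_reassoc, List.drop_left, List.drop_succ_cons, List.drop_succ_cons, List.drop_succ_cons,
    List.drop_zero, join_splitCh]

-- ---- Str-level bridges ----

def pvWords (line : String) : List String := (PySem.Str.split? line " ").getD []

def pvKeep (s : String) : Bool := !(s == "" || PySem.Str.pyGet? s 0 == some '#')

lemma ofList_injective : Function.Injective String.ofList := by
  intro a b h
  have := congrArg String.toList h
  simpa using this

lemma words_eq (line : String) : pvWords line = (splitCh line.toList).map String.ofList := by
  have hsep : (" " : String).toList = [' '] := rfl
  simp [pvWords, PySem.Str.split?, PySem.Chars.split?, hsep, splitOn_eq]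

lemma cond_match (line pre : String) (w1 w2 w3 : List Char)
    (h1 : ' ' ∉ w1) (h2 : ' ' ∉ w2) (h3 : ' ' ∉ w3)
    (hpre : pre.toList = w1 ++ ' ' :: w2 ++ ' ' :: w3 ++ [' ']) :
    (decide (3 < (pvWords line).length) &&
      (pvWords line).take 3 == [String.ofList w1, String.ofList w2, String.ofList w3]) =
      PySem.Str.startswith line pre := by
  rw [words_eq, PySem.Str.startswith_eq, hpre, Bool.eq_iff_iff]
  rw [show [String.ofList w1, String.ofList w2, String.ofList w3] =
      [w1, w2, w3].map String.ofList from rfl]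
  simp only [Bool.and_eq_true, decide_eq_true_eq, beq_iff_eq, List.length_map, ← List.map_take,
    (List.map_injective_iff.mpr ofList_injective).eq_iff]
  rw [← token_iff w1 w2 w3 line.toList h1 h2 h3]
  exact and_comm

lemma join_tail (line pre : String) (w1 w2 w3 : List Char)
    (h1 : ' ' ∉ w1) (h2 : ' ' ∉ w2) (h3 : ' ' ∉ w3)
    (hpre : pre.toList = w1 ++ ' ' :: w2 ++ ' ' :: w3 ++ [' '])
    (hp : PySem.Str.startswith line pre = true) :
    PySem.Str.join " " ((pvWords line).drop 3) = pyRemovePrefix line pre := by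
  rw [pyRemovePrefix, if_pos hp, words_eq, ← List.map_drop]
  have hsep : (" " : String).toList = [' '] := rfl
  rw [PySem.Str.startswith_eq, hpre] at hp
  simp only [PySem.Str.join, PySem.Chars.join, hsep, List.map_map,
    Function.comp_def, String.toList_ofList, List.map_id']
  rw [token_tail w1 w2 w3 line.toList h1 h2 h3 hp, hpre]

-- A's per-line rule branch computes pvLine "rule"
lemma ruleLine (line : String) :
    (if PySem.Str.startswith line "ip rule add " then
      "ip rule del " ++ pyRemovePrefix line "ip rule add " ++ " || true"
    else "# manual rule cleanup required: " ++ line) = pvConvert line "rule" := by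
  have hw : ∀ w ∈ [['i','p'], ['r','u','l','e'], ['a','d','d']], ' ' ∉ w := by decide
  have hc := cond_match line "ip rule add " ['i','p'] ['r','u','l','e'] ['a','d','d']
    (hw _ (by simp)) (hw _ (by simp)) (hw _ (by simp)) rfl
  simp only [pvConvert]
  rw [show (PySem.Str.split? line " ").getD [] = pvWords line from rfl]
  simp only [show (("rule" : String) == "rule") = true from by decide,
    show (("rule" : String) == "route") = false from by decide, Bool.true_and, Bool.false_and]
  rw [show (["ip", "rule", "add"] : List String) =
      [String.ofList ['i','p'], String.ofList ['r','u','l','e'], String.ofList ['a','d','d']]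
    from by decide] at *
  rw [hc]
  by_cases hs : PySem.Str.startswith line "ip rule add " = true
  · rw [if_pos hs, if_pos hs,
      join_tail line "ip rule add " ['i','p'] ['r','u','l','e'] ['a','d','d']
        (hw _ (by simp)) (hw _ (by simp)) (hw _ (by simp)) rfl hs]
  · rw [if_neg hs, if_neg hs, show ("# manual " ++ "rule" ++ " cleanup required: " : String) =
      "# manual rule cleanup required: " from by decide]
    simp

lemma routeLine (line : String) :
    (if PySem.Str.startswith line "ip route replace " then
      "ip route del " ++ pyRemovePrefix line "ip route replace " ++ " || true"
    else if PySem.Str.startswith line "ip route add " then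
      "ip route del " ++ pyRemovePrefix line "ip route add " ++ " || true"
    else "# manual route cleanup required: " ++ line) = pvConvert line "route" := by
  have w_ip : ' ' ∉ ['i','p'] := by decide
  have w_route : ' ' ∉ ['r','o','u','t','e'] := by decide
  have w_replace : ' ' ∉ ['r','e','p','l','a','c','e'] := by decide
  have w_add : ' ' ∉ ['a','d','d'] := by decide
  have hcR := cond_match line "ip route replace " ['i','p'] ['r','o','u','t','e']
    ['r','e','p','l','a','c','e'] w_ip w_route w_replace rfl
  have hcA := cond_match line "ip route add " ['i','p'] ['r','o','u','t','e']
    ['a','d','d'] w_ip w_route w_add rfl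
  simp only [pvConvert]
  rw [show (PySem.Str.split? line " ").getD [] = pvWords line from rfl]
  simp only [show (("route" : String) == "rule") = false from by decide,
    show (("route" : String) == "route") = true from by decide, Bool.true_and, Bool.false_and,
    Bool.false_eq_true, if_false]
  rw [show (["ip", "route", "replace"] : List String) =
      [String.ofList ['i','p'], String.ofList ['r','o','u','t','e'],
        String.ofList ['r','e','p','l','a','c','e']] from by decide,
    show (["ip", "route", "add"] : List String) =
      [String.ofList ['i','p'], String.ofList ['r','o','u','t','e'],
        String.ofList ['a','d','d']] from by decide,
    Bool.and_or_distrib_left, hcR, hcA]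
  by_cases hsR : PySem.Str.startswith line "ip route replace " = true
  · rw [if_pos hsR, if_pos (by rw [Bool.or_eq_true]; exact Or.inl hsR),
      join_tail line "ip route replace " ['i','p'] ['r','o','u','t','e']
        ['r','e','p','l','a','c','e'] w_ip w_route w_replace rfl hsR]
  · rw [if_neg hsR]
    by_cases hsA : PySem.Str.startswith line "ip route add " = true
    · rw [if_pos hsA, if_pos (by rw [Bool.or_eq_true]; exact Or.inr hsA),
        join_tail line "ip route add " ['i','p'] ['r','o','u','t','e']
          ['a','d','d'] w_ip w_route w_add rfl hsA]
    · rw [if_neg hsA, if_neg (by simp only [Bool.or_eq_true]; rintro (h | h); exacts [hsR h, hsA h]),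
        show ("# manual " ++ "route" ++ " cleanup required: " : String) =
          "# manual route cleanup required: " from by decide]

lemma pvRemovals_eq (raws : List String) (kind : String) :
    pvRemovals raws kind = ((raws.map PySem.Str.strip).filter pvKeep).map (fun line => pvConvert line kind) := by
  induction raws with
  | nil => rfl
  | cons raw raws ih =>
    rw [pvRemovals]
    by_cases hk : (PySem.Str.strip raw == "" || PySem.Str.pyGet? (PySem.Str.strip raw) 0 == some '#') = true
    · have hkeep : pvKeep (PySem.Str.strip raw) = false := by unfold pvKeep; rw [hk]; rfl
      rw [if_pos hk, ih, List.map_cons, List.filter_cons, hkeep]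
      simp
    · rw [if_neg hk]
      have hk' : (PySem.Str.strip raw == "" || PySem.Str.pyGet? (PySem.Str.strip raw) 0 == some '#') = false := by
        simpa using hk
      have hkeep : pvKeep (PySem.Str.strip raw) = true := by unfold pvKeep; rw [hk']; rfl
      rw [List.map_cons, List.filter_cons, hkeep, if_pos rfl, List.map_cons, ih]

-- the head of a dropWhile result falsifies the predicate
lemma head_dropWhile_false {p : Char → Bool} {l rest : List Char} {c : Char}
    (h : List.dropWhile p l = c :: rest) : p c = false := by
  induction l with
  | nil => simp at h
  | cons a as ih =>
    by_cases ha : p a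
    · exact ih (by simpa [List.dropWhile, ha] using h)
    · simp only [List.dropWhile, ha] at h
      simp only [List.cons.injEq] at h
      rw [← h.1]
      simpa using ha

-- rstrip keeps the head of a list whose head is not whitespace
lemma rstrip_cons_head (c : Char) (rest : List Char) (hc : PySem.Chars.isspace c = false) :
    ∃ d, PySem.Chars.rstrip (c :: rest) = c :: d := by
  have hrev : (c :: rest).reverse = rest.reverse ++ [c] := by simp
  simp only [PySem.Chars.rstrip, hrev, List.dropWhile_append]
  by_cases he : (List.dropWhile PySem.Chars.isspace rest.reverse).isEmpty
  · exact ⟨[], by simp [he, List.dropWhile, hc]⟩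
  · exact ⟨(List.dropWhile PySem.Chars.isspace rest.reverse).reverse, by simp [he]⟩

-- A's comment test (on the lstripped line) agrees with the test on the stripped line
lemma cond_eq (line : String) :
    (!(PySem.Str.strip line == "") && !(PySem.Str.startswith (PySem.Str.lstrip line) "#")) =
    (!(PySem.Str.strip line == "") && !(PySem.Str.startswith (PySem.Str.strip line) "#")) := by
  cases hstrip : PySem.Str.strip line == "" with
  | true => simp
  | false =>
    have hlist : PySem.Chars.strip line.toList ≠ [] := by
      intro h
      have h2 : (PySem.Str.strip line).toList = [] := by
        rw [PySem.Str.toList_strip, h]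
      have : PySem.Str.strip line = "" := String.toList_eq_nil_iff.mp h2
      simp [this] at hstrip
    cases hl : PySem.Chars.lstrip line.toList with
    | nil => exact absurd (by simp [PySem.Chars.strip, hl, PySem.Chars.rstrip]) hlist
    | cons c rest =>
      have hc : PySem.Chars.isspace c = false := head_dropWhile_false hl
      obtain ⟨d, hd⟩ := rstrip_cons_head c rest hc
      have hs : PySem.Chars.strip line.toList = c :: d := by
        simp [PySem.Chars.strip, hl, hd]
      have key : PySem.Chars.startswith (PySem.Chars.lstrip line.toList) ['#'] =
          PySem.Chars.startswith (PySem.Chars.strip line.toList) ['#'] := by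
        rw [hl, hs]
        simp [PySem.Chars.startswith, List.isPrefixOf]
      simp [PySem.Str.startswith_eq, PySem.Str.toList_lstrip, PySem.Str.toList_strip, key]

-- B's first-character comment test is A's startswith test
lemma hash_head (s : String) :
    (PySem.Str.pyGet? s 0 == some '#') = PySem.Str.startswith s "#" := by
  rw [PySem.Str.pyGet?, PySem.Str.startswith_eq, show ("#" : String).toList = ['#'] from rfl]
  cases s.toList with
  | nil => rfl
  | cons c cs =>
    simp [PySem.Chars.pyGet?, PySem.List.pyGet?, PySem.List.pyIdx?, PySem.Chars.startswith,
      List.isPrefixOf, eq_comm]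

-- B's kept stripped lines are exactly A's _executable_lines
lemma execB_eq (text : String) :
    ((PySem.Str.splitlines text).map PySem.Str.strip).filter pvKeep = pvExecLinesA text := by
  rw [pvExecLinesA, List.filter_map]
  refine congrArg (List.map _) (List.filter_congr fun line _ => ?_)
  rw [Function.comp_apply, cond_eq line]
  unfold pvKeep
  rw [hash_head, Bool.not_or]

-- A's rule-loop body appends exactly B's _convert value
lemma ruleBody (acc : List String) (line : String) :
    (if PySem.Str.startswith line "ip rule add " then
      acc ++ ["ip rule del " ++ pyRemovePrefix line "ip rule add " ++ " || true"]
    else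
      acc ++ ["# manual rule cleanup required: " ++ line]) = acc ++ [pvConvert line "rule"] := by
  rw [← ruleLine]
  exact (apply_ite (fun s => acc ++ [s]) _ _ _).symm

-- A's route-loop body appends exactly B's _convert value
lemma routeBody (acc : List String) (line : String) :
    (if PySem.Str.startswith line "ip route replace " then
      acc ++ ["ip route del " ++ pyRemovePrefix line "ip route replace " ++ " || true"]
    else if PySem.Str.startswith line "ip route add " then
      acc ++ ["ip route del " ++ pyRemovePrefix line "ip route add " ++ " || true"]
    else
      acc ++ ["# manual route cleanup required: " ++ line]) = acc ++ [pvConvert line "route"] := by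
  rw [← routeLine, apply_ite (fun s => acc ++ [s]), apply_ite (fun s => acc ++ [s])]

theorem derive_equal (rule_text route_text : String) :
    derive_routing_remove_lines_py rule_text route_text =
    derive_routing_remove_lines_py_alt rule_text route_text := by
  simp only [derive_routing_remove_lines_py, derive_routing_remove_lines_py_alt,
    pvRemovals_eq, execB_eq, ruleBody, routeBody,
    PySem.List.foldl_append_singleton_eq_map, List.nil_append]

-- ===== VERDICT (by name: the statement is the Claim_ definition above) =====
theorem derive_routing_remove_lines_py_spec : Claim_equal_derive_routing_remove_lines_py := by
  intro rule_text route_text _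
  unfold Spec_derive_routing_remove_lines_py
  exact derive_equal rule_text route_text
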